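-- pv_equiv track=rewrite | github.com/NathanF28/LeetCodeQA | 2089-maximum-matrix-sum/maximum-matrix-sum.py | maxMatrixSum
-- ===== SOURCE A (Python) =====
-- from typing import List
--
-- def maxMatrixSum(matrix: List[List[int]]) -> int:
--     cnt = 0
--     _min = 2 ** 31
--     ans = 0
--     for i in range(len(matrix)):
--         for j in range(len(matrix)):
--
--             e = matrix[i][j]
--
--             if(e < 0):
--                 cnt += 1
--
--             e = abs(e)
--
--             if(e < _min):
--                 _min = e
--
--             ans += e
--
--     if(cnt % 2 != 0):
--         ans -= _min * 2
--
--     return ans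
-- ===== SOURCE B (Python) =====
-- def maxMatrixSum(matrix):
--     # DP over sign-flip parity: best_even / best_odd are the maximum achievable
--     # sums of the entries seen so far using an even / odd number of sign flips.
--     # Flips come in pairs, so the answer is best_even.
--     best_even, best_odd = 0, -(2 ** 63)
--     for i in range(len(matrix)):
--         for j in range(len(matrix)):
--             e = matrix[i][j]
--             best_even, best_odd = max(best_even + e, best_odd - e), max(best_odd + e, best_even - e)
--     return best_even
-- ===== Notes on version B (the rewrite author's own statement) =====
-- stated objective: alternative
-- what changed: A's fused loop with three accumulators (negative count, running minimum absolute value, sum of absolute values) and a final parity adjustment is replaced by a two-state dynamic program over the entries that tracks the best achievable sum with an even and with an odd number of sign flips and returns the even-parity state directly, with no counting, abs-summing, min tracking, or final branch.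
import Mathlib
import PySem

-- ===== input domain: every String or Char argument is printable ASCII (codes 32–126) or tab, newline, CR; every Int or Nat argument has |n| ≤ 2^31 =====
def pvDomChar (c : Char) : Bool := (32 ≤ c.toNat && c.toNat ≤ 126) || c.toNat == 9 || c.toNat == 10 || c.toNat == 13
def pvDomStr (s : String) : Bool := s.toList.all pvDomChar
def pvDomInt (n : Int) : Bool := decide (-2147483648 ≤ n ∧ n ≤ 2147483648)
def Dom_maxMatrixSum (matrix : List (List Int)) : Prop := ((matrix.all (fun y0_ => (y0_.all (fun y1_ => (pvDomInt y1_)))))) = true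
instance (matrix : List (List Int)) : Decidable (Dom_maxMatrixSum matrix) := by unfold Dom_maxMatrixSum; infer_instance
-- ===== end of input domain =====

-- B replaces A's fused count/min/sum accumulators plus final parity branch by a two-state
-- dynamic program over the entries (best sum with an even / odd number of sign flips),
-- returning the even-parity state directly; same cost, a genuinely different algorithm.

-- ===== PORT A =====
def maxMatrixSum (matrix : List (List Int)) : Int :=
  let cnt : Int := 0
  let _min : Int := 2 ^ 31
  let ans : Int := 0
  let st := (PySem.List.pyRange 0 (PySem.List.len matrix) 1).foldl
    (fun (st : Int × Int × Int) i =>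
      (PySem.List.pyRange 0 (PySem.List.len matrix) 1).foldl
        (fun (st : Int × Int × Int) j =>
          let e := PySem.List.pyGetD (PySem.List.pyGetD matrix i []) j 0
          let cnt := if e < 0 then st.1 + 1 else st.1
          let e' := |e|
          let m := if e' < st.2.1 then e' else st.2.1
          (cnt, m, st.2.2 + e')) st)
    (cnt, _min, ans)
  if PySem.Int.mod st.1 2 ≠ 0 then st.2.2 - st.2.1 * 2 else st.2.2

-- ===== PORT B =====
def maxMatrixSum_alt (matrix : List (List Int)) : Int :=
  let st := (PySem.List.pyRange 0 (PySem.List.len matrix) 1).foldl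
    (fun (st : Int × Int) i =>
      (PySem.List.pyRange 0 (PySem.List.len matrix) 1).foldl
        (fun (st : Int × Int) j =>
          let e := PySem.List.pyGetD (PySem.List.pyGetD matrix i []) j 0
          (max (st.1 + e) (st.2 - e), max (st.2 + e) (st.1 - e))) st)
    ((0 : Int), -(2 ^ 63))
  st.1

-- ===== PRECONDITION & SPEC =====
-- Pre_ excludes matrices with a row shorter than the number of rows: there BOTH A and B raise IndexError
-- at matrix[i][j] (both index columns 0..len(matrix)-1 of every row).
def Pre_maxMatrixSum (matrix : List (List Int)) : Prop :=
  ∀ row ∈ matrix, matrix.length ≤ row.length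
instance (matrix : List (List Int)) : Decidable (Pre_maxMatrixSum matrix) := by
  unfold Pre_maxMatrixSum; infer_instance
def pvWitness_maxMatrixSum : List (List Int) := [[1, -2], [3, -4]]

def Spec_maxMatrixSum (matrix : List (List Int)) (out : Int) : Prop := out = maxMatrixSum_alt matrix
instance (matrix : List (List Int)) (out : Int) : Decidable (Spec_maxMatrixSum matrix out) := by unfold Spec_maxMatrixSum; infer_instance

-- ===== CLAIM (what is proved, stated in full; the proofs are below) =====
def Claim_equal_maxMatrixSum : Prop := ∀ (matrix : List (List Int)), Dom_maxMatrixSum matrix → Pre_maxMatrixSum matrix → Spec_maxMatrixSum matrix (maxMatrixSum matrix)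

-- ===== LEMMAS AND PROOFS =====

-- Both nested index loops over matrix[i][j] are a single fold over the same flat entry list.
theorem pv_nested_fold {α : Type} (matrix : List (List Int)) (f : α → Int → α) (init : α) :
    (PySem.List.pyRange 0 (PySem.List.len matrix) 1).foldl
      (fun st i => (PySem.List.pyRange 0 (PySem.List.len matrix) 1).foldl
          (fun st j => f st (PySem.List.pyGetD (PySem.List.pyGetD matrix i []) j 0)) st) init
    = (matrix.flatMap (fun row => (PySem.List.pyRange 0 (PySem.List.len matrix) 1).map
          (fun j => PySem.List.pyGetD row j 0))).foldl f init := by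
  rw [List.foldl_flatMap,
    ← PySem.List.foldl_pyRange_zero_pyGetD matrix ([] : List Int)
      (fun st row => ((PySem.List.pyRange 0 (PySem.List.len matrix) 1).map
          (fun j => PySem.List.pyGetD row j 0)).foldl f st) init]
  apply PySem.List.foldl_congr_mem
  intro st i _
  rw [List.foldl_map]

-- characterisation of A's fused loop body: count of negatives, running min of |e|, sum of |e|
theorem pv_foldA (es : List Int) (c m a : Int) :
    es.foldl (fun (st : Int × Int × Int) e =>
        (if e < 0 then st.1 + 1 else st.1,
         if |e| < st.2.1 then |e| else st.2.1,
         st.2.2 + |e|)) (c, m, a)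
    = (c + (es.countP (fun e => decide (e < 0)) : Int),
       (es.map (fun e => |e|)).foldl min m,
       a + (es.map (fun e => |e|)).sum) := by
  induction es generalizing c m a with
  | nil => simp
  | cons h t ih =>
    simp only [List.foldl_cons, List.map_cons, List.countP_cons, List.sum_cons, ih]
    have hmin : (if |h| < m then |h| else m) = min m |h| := by
      rw [min_def]; split_ifs <;> omega
    rw [hmin]
    refine Prod.ext ?_ (Prod.ext rfl ?_)
    · by_cases h0 : h < 0 <;> simp [h0, add_comm, add_assoc]
    · simp
      ring

-- B's DP state when the count of negatives is c, the minimum abs is m, the abs sum is s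
def pvPair (c m s : Int) : Int × Int :=
  (s - (if PySem.Int.mod c 2 ≠ 0 then 2 * m else 0),
   s - (if PySem.Int.mod c 2 ≠ 0 then 0 else 2 * m))

-- one DP step preserves the characterisation (needs only 0 ≤ m)
theorem pv_mod2 (x : Int) : PySem.Int.mod x 2 = x % 2 :=
  PySem.Int.mod_eq_emod_of_pos (by norm_num)

theorem pv_step (c m s e : Int) (hm : 0 ≤ m) :
    (max ((pvPair c m s).1 + e) ((pvPair c m s).2 - e),
     max ((pvPair c m s).2 + e) ((pvPair c m s).1 - e))
    = pvPair (c + if e < 0 then 1 else 0) (min m |e|) (s + |e|) := by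
  rcases abs_cases e with ⟨ha, he⟩ | ⟨ha, he⟩ <;>
    simp only [pvPair, pv_mod2, Prod.mk.injEq, max_def, min_def, ha] <;>
    split_ifs <;> constructor <;> omega

-- the DP fold from any characterised state
theorem pv_fold (t : List Int) : ∀ c m s : Int, 0 ≤ m →
    t.foldl (fun (st : Int × Int) e => (max (st.1 + e) (st.2 - e), max (st.2 + e) (st.1 - e)))
        (pvPair c m s)
    = pvPair (c + (t.countP (fun e => decide (e < 0)) : Int))
        ((t.map (fun e => |e|)).foldl min m)
        (s + (t.map (fun e => |e|)).sum) := by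
  induction t with
  | nil => intro c m s _; simp
  | cons e t ih =>
    intro c m s hm
    rw [List.foldl_cons, pv_step c m s e hm,
      ih _ _ _ (le_min hm (abs_nonneg e))]
    simp only [List.map_cons, List.foldl_cons, List.countP_cons, List.sum_cons]
    have h1 : c + (if e < 0 then 1 else 0) + ((t.countP (fun e => decide (e < 0)) : Nat) : Int)
        = c + (((t.countP (fun e => decide (e < 0)) + if decide (e < 0) = true then 1 else 0 : Nat)) : Int) := by
      by_cases h0 : e < 0 <;> simp [h0] <;> omega
    rw [h1]
    congr 1
    omega

-- the first DP step from the initial state (0, -2^63), for |e| ≤ 2^31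
theorem pv_head (e : Int) (he : |e| ≤ 2 ^ 31) :
    (max ((0 : Int) + e) (-(2 ^ 63) - e), max (-(2 ^ 63) + e) ((0 : Int) - e))
    = pvPair (if e < 0 then 1 else 0) |e| |e| := by
  rcases abs_cases e with ⟨ha, h0⟩ | ⟨ha, h0⟩ <;>
    simp only [pvPair, pv_mod2, Prod.mk.injEq, max_def, ha] <;>
    split_ifs <;> constructor <;> omega

theorem maxMatrixSum_spec : Claim_equal_maxMatrixSum := by
  intro matrix hdom hpre
  unfold Spec_maxMatrixSum maxMatrixSum maxMatrixSum_alt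
  have hA := pv_nested_fold matrix (fun (st : Int × Int × Int) e =>
      (if e < 0 then st.1 + 1 else st.1,
       if |e| < st.2.1 then |e| else st.2.1,
       st.2.2 + |e|)) (0, 2 ^ 31, 0)
  have hB := pv_nested_fold matrix (fun (st : Int × Int) e =>
      (max (st.1 + e) (st.2 - e), max (st.2 + e) (st.1 - e))) ((0 : Int), -(2 ^ 63))
  simp only [hA, hB]
  set es := matrix.flatMap (fun row => (PySem.List.pyRange 0 (PySem.List.len matrix) 1).map
      (fun j => PySem.List.pyGetD row j 0)) with hes
  have hb : ∀ x ∈ es, |x| ≤ 2 ^ 31 := by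
    intro x hx
    rcases List.mem_flatMap.1 hx with ⟨row, hrow, hme⟩
    rcases List.mem_map.1 hme with ⟨j, hj, rfl⟩
    rcases (PySem.List.mem_pyRange_one).1 hj with ⟨hj0, hjn⟩
    have hjlen : j < (row.length : Int) := by
      have := hpre row hrow
      simp only [PySem.List.len_eq] at hjn
      omega
    have hin : PySem.Raise.InRange row.length j := by
      unfold PySem.Raise.InRange; omega
    have hmem : PySem.List.pyGetD row j 0 ∈ row :=
      PySem.List.pyGetD_mem row 0 hin
    have : pvDomInt (PySem.List.pyGetD row j 0) = true := by
      unfold Dom_maxMatrixSum at hdom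
      simp only [List.all_eq_true] at hdom
      exact hdom row hrow _ hmem
    simp only [pvDomInt, decide_eq_true_eq] at this
    calc |PySem.List.pyGetD row j 0| ≤ 2147483648 := abs_le.mpr this
      _ = 2 ^ 31 := by norm_num
  rw [pv_foldA]
  clear hes
  clear_value es
  cases es with
  | nil => simp [PySem.Int.mod]
  | cons e t =>
    rw [List.foldl_cons, pv_head e (hb e (List.mem_cons_self ..)),
      pv_fold t _ _ _ (abs_nonneg e)]
    have hmin : ((e :: t).map (fun x => |x|)).foldl min (2 ^ 31)
        = (t.map (fun x => |x|)).foldl min |e| := by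
      simp only [List.map_cons, List.foldl_cons]
      rw [min_eq_right (hb e (List.mem_cons_self ..))]
    rw [hmin]
    simp only [pvPair, pv_mod2, List.countP_cons, List.map_cons, List.sum_cons]
    by_cases h0 : e < 0 <;> simp only [h0, decide_true, decide_false, if_true, if_false] <;>
      split_ifs <;> push_cast at * <;> omega
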